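-- pv_equiv track=rewrite | github.com/ExiledMender/ea_analyzer_tool | create_html.py | get_processes
-- ===== SOURCE A (Python) =====
-- def get_processes(state):
--     processes_state_map = {
--         'MBAMService': 'mbam_service',
--         'MBCloudEA': 'mb_cloud_ea',
--         'EAServiceMonitor': 'ea_service_monitor',
--         'EATray': 'ea_tray',
--         'MBVpnService': 'mb_vpn_service'
--     }
--
--     process_info = {
--         'mbam_service': 'N/A',
--         'mb_cloud_ea': 'N/A',
--         'ea_service_monitor': 'N/A',
--         'ea_tray': 'N/A',
--         'mb_vpn_service': 'N/A'
--     }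
--
--     for s in state:
--         name = s.get('name', '')
--         process_value = s.get('responding', 'N/A')
--         if name in processes_state_map:
--             internal_name = processes_state_map[name]
--             process_info[internal_name] = process_value
--
--     return process_info
-- ===== SOURCE B (Python) =====
-- def get_processes(state):
--     processes_state_map = {
--         'MBAMService': 'mbam_service',
--         'MBCloudEA': 'mb_cloud_ea',
--         'EAServiceMonitor': 'ea_service_monitor',
--         'EATray': 'ea_tray',
--         'MBVpnService': 'mb_vpn_service'
--     }
--     lookup = {s.get('name', ''): s.get('responding', 'N/A') for s in state}
--     return {internal: lookup.get(orig, 'N/A')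
--             for orig, internal in processes_state_map.items()}
-- ===== Notes on version B (the rewrite author's own statement) =====
-- stated objective: simpler
-- what changed: B builds a name->responding index dict from state in one comprehension and then constructs the result by iterating over the fixed process-name map with lookup.get defaults, instead of A's pre-initialised result dict mutated while looping over state.
import Mathlib
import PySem

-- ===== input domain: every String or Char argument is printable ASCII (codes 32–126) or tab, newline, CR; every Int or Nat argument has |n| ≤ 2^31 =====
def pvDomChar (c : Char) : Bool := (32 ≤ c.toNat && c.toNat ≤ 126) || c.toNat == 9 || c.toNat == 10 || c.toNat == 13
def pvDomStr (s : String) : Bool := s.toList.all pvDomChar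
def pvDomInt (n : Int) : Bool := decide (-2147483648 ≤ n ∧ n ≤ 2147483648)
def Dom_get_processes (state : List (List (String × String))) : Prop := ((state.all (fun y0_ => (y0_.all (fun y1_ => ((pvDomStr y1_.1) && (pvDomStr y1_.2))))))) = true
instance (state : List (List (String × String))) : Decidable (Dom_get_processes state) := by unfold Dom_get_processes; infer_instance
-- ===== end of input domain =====

-- B replaces A's mutate-while-scanning loop with a one-pass name index plus a map over the
-- fixed process table (objective: simpler).

-- ===== PORT A =====
-- A-side helpers: the two literal dicts A creates, and the body of A's for-loop.
def pvStateMapA : PySem.Dict String String := PySem.Dict.mk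
  [("MBAMService", "mbam_service"), ("MBCloudEA", "mb_cloud_ea"),
   ("EAServiceMonitor", "ea_service_monitor"), ("EATray", "ea_tray"),
   ("MBVpnService", "mb_vpn_service")]

def pvInitA : PySem.Dict String String := PySem.Dict.mk
  [("mbam_service", "N/A"), ("mb_cloud_ea", "N/A"), ("ea_service_monitor", "N/A"),
   ("ea_tray", "N/A"), ("mb_vpn_service", "N/A")]

def pvStepA (info : PySem.Dict String String) (s : List (String × String)) : PySem.Dict String String :=
  let name := (PySem.Dict.mk s).getD "name" ""
  let process_value := (PySem.Dict.mk s).getD "responding" "N/A"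
  match pvStateMapA.get? name with          -- 'if name in processes_state_map: internal = map[name]'
  | some internal_name => info.insert internal_name process_value
  | none => info

def get_processes (state : List (List (String × String))) : List (String × String) :=
  (state.foldl pvStepA pvInitA).items

-- ===== PORT B =====
def pvLookupB (state : List (List (String × String))) : PySem.Dict String String :=
  state.foldl (fun L s =>
    L.insert ((PySem.Dict.mk s).getD "name" "") ((PySem.Dict.mk s).getD "responding" "N/A"))
    PySem.Dict.empty

def get_processes_alt (state : List (List (String × String))) : List (String × String) :=
  let lookup := pvLookupB state
  [("MBAMService", "mbam_service"), ("MBCloudEA", "mb_cloud_ea"),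
   ("EAServiceMonitor", "ea_service_monitor"), ("EATray", "ea_tray"),
   ("MBVpnService", "mb_vpn_service")].map
    (fun p => (p.2, lookup.getD p.1 "N/A"))

-- ===== PRECONDITION & SPEC =====
def Spec_get_processes (state : List (List (String × String))) (out : List (String × String)) : Prop := out = get_processes_alt state
instance (state : List (List (String × String))) (out : List (String × String)) : Decidable (Spec_get_processes state out) := by unfold Spec_get_processes; infer_instance

-- ===== CLAIM (what is proved, stated in full; the proofs are below) =====
def Claim_equal_get_processes : Prop := ∀ (state : List (List (String × String))), Dom_get_processes state → Spec_get_processes state (get_processes state)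

-- ===== LEMMAS AND PROOFS =====

-- last-wins value for original name `o` over `state`, starting from `x`
def pvLast (state : List (List (String × String))) (o x : String) : String :=
  state.foldl (fun acc s => if (PySem.Dict.mk s).getD "name" "" = o then (PySem.Dict.mk s).getD "responding" "N/A" else acc) x

lemma foldA_items (state : List (List (String × String))) (x1 x2 x3 x4 x5 : String) :
    state.foldl pvStepA (PySem.Dict.mk
      [("mbam_service", x1), ("mb_cloud_ea", x2), ("ea_service_monitor", x3),
       ("ea_tray", x4), ("mb_vpn_service", x5)]) =
    PySem.Dict.mk
      [("mbam_service", pvLast state "MBAMService" x1),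
       ("mb_cloud_ea", pvLast state "MBCloudEA" x2),
       ("ea_service_monitor", pvLast state "EAServiceMonitor" x3),
       ("ea_tray", pvLast state "EATray" x4),
       ("mb_vpn_service", pvLast state "MBVpnService" x5)] := by
  induction state generalizing x1 x2 x3 x4 x5 with
  | nil => simp [pvLast]
  | cons s rest ih =>
    have hstep : pvStepA (PySem.Dict.mk
        [("mbam_service", x1), ("mb_cloud_ea", x2), ("ea_service_monitor", x3),
         ("ea_tray", x4), ("mb_vpn_service", x5)]) s =
      PySem.Dict.mk
        [("mbam_service", if (PySem.Dict.mk s).getD "name" "" = "MBAMService" then (PySem.Dict.mk s).getD "responding" "N/A" else x1),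
         ("mb_cloud_ea", if (PySem.Dict.mk s).getD "name" "" = "MBCloudEA" then (PySem.Dict.mk s).getD "responding" "N/A" else x2),
         ("ea_service_monitor", if (PySem.Dict.mk s).getD "name" "" = "EAServiceMonitor" then (PySem.Dict.mk s).getD "responding" "N/A" else x3),
         ("ea_tray", if (PySem.Dict.mk s).getD "name" "" = "EATray" then (PySem.Dict.mk s).getD "responding" "N/A" else x4),
         ("mb_vpn_service", if (PySem.Dict.mk s).getD "name" "" = "MBVpnService" then (PySem.Dict.mk s).getD "responding" "N/A" else x5)] := by
      simp only [pvStepA]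
      by_cases h1 : (PySem.Dict.mk s).getD "name" "" = "MBAMService"
      · simp [h1, pvStateMapA, PySem.Dict.get?, PySem.Dict.insert, PySem.Dict.contains]
      by_cases h2 : (PySem.Dict.mk s).getD "name" "" = "MBCloudEA"
      · simp [h2, pvStateMapA, PySem.Dict.get?, PySem.Dict.insert, PySem.Dict.contains]
      by_cases h3 : (PySem.Dict.mk s).getD "name" "" = "EAServiceMonitor"
      · simp [h3, pvStateMapA, PySem.Dict.get?, PySem.Dict.insert, PySem.Dict.contains]
      by_cases h4 : (PySem.Dict.mk s).getD "name" "" = "EATray"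
      · simp [h4, pvStateMapA, PySem.Dict.get?, PySem.Dict.insert, PySem.Dict.contains]
      by_cases h5 : (PySem.Dict.mk s).getD "name" "" = "MBVpnService"
      · simp [h5, pvStateMapA, PySem.Dict.get?, PySem.Dict.insert, PySem.Dict.contains]
      have g1 : ¬ ("MBAMService" = (PySem.Dict.mk s).getD "name" "") := fun h => h1 h.symm
      have g2 : ¬ ("MBCloudEA" = (PySem.Dict.mk s).getD "name" "") := fun h => h2 h.symm
      have g3 : ¬ ("EAServiceMonitor" = (PySem.Dict.mk s).getD "name" "") := fun h => h3 h.symm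
      have g4 : ¬ ("EATray" = (PySem.Dict.mk s).getD "name" "") := fun h => h4 h.symm
      have g5 : ¬ ("MBVpnService" = (PySem.Dict.mk s).getD "name" "") := fun h => h5 h.symm
      simp [pvStateMapA, PySem.Dict.get?, h1, h2, h3, h4, h5, g1, g2, g3, g4, g5]
    rw [List.foldl_cons, hstep, ih]
    simp [pvLast]

lemma lookupB_getD (state : List (List (String × String))) (L : PySem.Dict String String) (o : String) :
    (state.foldl (fun L s =>
        L.insert ((PySem.Dict.mk s).getD "name" "") ((PySem.Dict.mk s).getD "responding" "N/A")) L).getD o "N/A" =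
    pvLast state o (L.getD o "N/A") := by
  induction state generalizing L with
  | nil => simp [pvLast]
  | cons s rest ih =>
    simp only [List.foldl_cons, pvLast] at *
    rw [ih]
    by_cases h : (PySem.Dict.mk s).getD "name" "" = o
    · simp [h]
    · have h' : o ≠ (PySem.Dict.mk s).getD "name" "" := fun he => h he.symm
      simp [h, h', PySem.Dict.getD_insert]

-- ===== VERDICT (by name: the statement is the Claim_ definition above) =====
theorem get_processes_spec : Claim_equal_get_processes := by
  intro state _
  show get_processes state = get_processes_alt state
  unfold get_processes get_processes_alt pvLookupB pvInitA
  rw [foldA_items]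
  have h := fun o => lookupB_getD state PySem.Dict.empty o
  simp only [PySem.Dict.getD_empty] at h
  simp [h]
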